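-- pv_equiv track=rewrite | github.com/emilyzhong/advent-of-code | 2020/17.py | neighbor_diffs
-- ===== SOURCE A (Python) =====
-- def neighbor_diffs(dim):
--   diffs = [-1, 0, 1]
--   neighbors = [()]
--   for _ in range(dim):
--     temp_neighbors = []
--     for diff in diffs:
--       temp_neighbors += [tuple(list(n) + [diff]) for n in neighbors]
--     neighbors = temp_neighbors
--
--   zeros = tuple([0 for _ in range(dim)])
--   neighbors.remove(zeros)
--   return neighbors
-- ===== SOURCE B (Python) =====
-- def neighbor_diffs(dim):
--   # enumerate offsets by counting k in base 3 (digit i -> coordinate i), skipping the origin's index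
--   total = 1
--   for _ in range(dim):
--     total *= 3
--   mid = (total - 1) // 2
--   result = []
--   for k in range(total):
--     if k == mid:
--       continue
--     digits = []
--     q = k
--     for _ in range(dim):
--       digits.append(q % 3 - 1)
--       q //= 3
--     result.append(tuple(digits))
--   return result
-- ===== Notes on version B (the rewrite author's own statement) =====
-- stated objective: alternative
-- what changed: Instead of rebuilding the whole neighbor list dim times via cartesian-product concatenation and then calling .remove to delete the origin tuple, B runs one flat counting loop over all ternary codes, decodes each index's base-three digits by repeated divmod into a coordinate tuple, and skips the single middle index that encodes the origin.
import Mathlib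
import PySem

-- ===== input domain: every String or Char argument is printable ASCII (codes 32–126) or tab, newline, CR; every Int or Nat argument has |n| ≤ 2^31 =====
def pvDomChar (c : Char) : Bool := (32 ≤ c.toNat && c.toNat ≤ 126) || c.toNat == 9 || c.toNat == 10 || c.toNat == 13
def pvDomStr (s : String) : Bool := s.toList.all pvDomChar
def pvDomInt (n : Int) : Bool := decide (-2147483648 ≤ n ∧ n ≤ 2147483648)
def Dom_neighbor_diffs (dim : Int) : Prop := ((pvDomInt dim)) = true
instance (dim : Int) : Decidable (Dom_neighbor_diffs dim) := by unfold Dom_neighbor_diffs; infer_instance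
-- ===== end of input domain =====

-- B replaces A's repeated cartesian-product list rebuilding + .remove with a single flat
-- counting loop that decodes each index's base-3 digits and skips the origin's index
-- (objective: alternative decomposition, same ordering and exact result).

-- ===== PORT A =====
def neighbor_diffs (dim : Int) : List (List Int) :=
  let diffs : List Int := [-1, 0, 1]
  let neighbors : List (List Int) :=
    (List.range dim.toNat).foldl
      (fun neighbors _ =>
        diffs.foldl (fun temp_neighbors diff =>
          temp_neighbors ++ neighbors.map (fun n => n ++ [diff])) [])
      [[]]
  let zeros : List Int := (List.range dim.toNat).map (fun _ => 0)
  -- neighbors.remove(zeros): zeros is always present, so remove? never fails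
  (PySem.List.remove? neighbors zeros).getD neighbors

-- ===== PORT B =====
def neighbor_diffs_alt (dim : Int) : List (List Int) :=
  let total : Nat := (List.range dim.toNat).foldl (fun t _ => t * 3) 1
  let mid : Nat := (total - 1) / 2
  (List.range total).foldl
    (fun result k =>
      if k = mid then result
      else
        result ++
          [((List.range dim.toNat).foldl
              (fun (s : List Int × Nat) _ => (s.1 ++ [((s.2 % 3 : Nat) : Int) - 1], s.2 / 3))
              ([], k)).1])
    []

-- ===== PRECONDITION & SPEC =====
def Spec_neighbor_diffs (dim : Int) (out : List (List Int)) : Prop := out = neighbor_diffs_alt dim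
instance (dim : Int) (out : List (List Int)) : Decidable (Spec_neighbor_diffs dim out) := by unfold Spec_neighbor_diffs; infer_instance

-- ===== CLAIM (what is proved, stated in full; the proofs are below) =====
def Claim_equal_neighbor_diffs : Prop := ∀ (dim : Int), Dom_neighbor_diffs dim → Spec_neighbor_diffs dim (neighbor_diffs dim)

-- ===== LEMMAS AND PROOFS =====

/-- digit map: the offset list B decodes from index `k` (coordinate i = base-3 digit i, minus 1). -/
def pvDig (n k : Nat) : List Int :=
  (List.range n).map (fun i => (((k / 3 ^ i) % 3 : Nat) : Int) - 1)

/-- the origin's index. -/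
def pvMid (n : Nat) : Nat := (3 ^ n - 1) / 2

lemma pvMid_succ (n : Nat) : pvMid (n + 1) = 3 * pvMid n + 1 := by
  obtain ⟨j, hj⟩ := (Nat.odd_iff.mpr (by simp [Nat.pow_mod] : 3 ^ n % 2 = 1))
  simp only [pvMid, pow_succ]
  omega

lemma pvMid_lt (n : Nat) : pvMid n < 3 ^ n := by
  have : 0 < 3 ^ n := Nat.pow_pos (by norm_num)
  simp only [pvMid]; omega

lemma pvMid_digit (n : Nat) : ∀ i < n, (pvMid n / 3 ^ i) % 3 = 1 := by
  induction n with
  | zero => intro i hi; omega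
  | succ n ih =>
    intro i hi
    match i with
    | 0 => simp [pvMid_succ]
    | j + 1 =>
      have h1 : pvMid (n + 1) / 3 ^ (j + 1) = (pvMid (n + 1) / 3) / 3 ^ j := by
        rw [pow_succ']
        exact (Nat.div_div_eq_div_mul _ 3 (3 ^ j)).symm
      have h2 : pvMid (n + 1) / 3 = pvMid n := by
        rw [pvMid_succ]; omega
      rw [h1, h2]
      exact ih j (by omega)

lemma pvMid_unique (n : Nat) : ∀ k < 3 ^ n, (∀ i < n, (k / 3 ^ i) % 3 = 1) → k = pvMid n := by
  induction n with
  | zero => intro k hk _; simp [pvMid]; omega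
  | succ n ih =>
    intro k hk h
    have h0 : k % 3 = 1 := by have := h 0 (by omega); simpa using this
    have hk3 : k / 3 < 3 ^ n := by
      rw [pow_succ] at hk
      omega
    have hdig : ∀ i < n, ((k / 3) / 3 ^ i) % 3 = 1 := by
      intro i hi
      have := h (i + 1) (by omega)
      rwa [pow_succ', ← Nat.div_div_eq_div_mul] at this
    have := ih (k / 3) hk3 hdig
    have hdm := Nat.div_add_mod k 3
    rw [pvMid_succ]
    omega

/-- the digit list of the origin index is all zeros. -/
lemma pvDig_mid (n : Nat) : pvDig n (pvMid n) = (List.range n).map (fun _ => (0 : Int)) := by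
  unfold pvDig
  apply List.map_congr_left
  intro i hi
  rw [List.mem_range] at hi
  rw [pvMid_digit n i hi]
  norm_num

/-- only the origin index decodes to all zeros. -/
lemma pvDig_eq_zeros_iff (n : Nat) (k : Nat) (hk : k < 3 ^ n) :
    pvDig n k = (List.range n).map (fun _ => (0 : Int)) ↔ k = pvMid n := by
  constructor
  · intro h
    apply pvMid_unique n k hk
    intro i hi
    unfold pvDig at h
    have := (List.map_inj_left).mp h i (List.mem_range.mpr hi)
    omega
  · intro h; rw [h]; exact pvDig_mid n

/-- decoding digits of `d * 3^n + r` (d < 3, r < 3^n): low digits come from r, digit n is d. -/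
lemma pvDig_block (n d r : Nat) (hd : d < 3) (hr : r < 3 ^ n) :
    pvDig (n + 1) (d * 3 ^ n + r) = pvDig n r ++ [(d : Int) - 1] := by
  unfold pvDig
  rw [List.range_succ, List.map_append]
  congr 1
  · apply List.map_congr_left
    intro i hi
    rw [List.mem_range] at hi
    have hpow : 3 ^ n = 3 ^ (n - i) * 3 ^ i := by
      rw [← pow_add]; congr 1; omega
    have h1 : (d * 3 ^ n + r) / 3 ^ i = r / 3 ^ i + d * 3 ^ (n - i) := by
      rw [hpow, ← mul_assoc, Nat.add_comm,
        Nat.add_mul_div_right _ _ (Nat.pow_pos (by norm_num))]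
    have hni : n - i = (n - i - 1) + 1 := by omega
    rw [h1, hni, pow_succ, ← mul_assoc, Nat.add_mul_mod_self_right]
  · have h2 : (d * 3 ^ n + r) / 3 ^ n = d := by
      rw [Nat.add_comm, Nat.add_mul_div_right _ _ (Nat.pow_pos (by norm_num)),
        Nat.div_eq_of_lt hr]
      omega
    simp only [List.map_cons, List.map_nil]
    rw [h2, Nat.mod_eq_of_lt hd]

/-- A's product loop enumerates exactly the base-3 decodings in counting order. -/
lemma pvLoopA (n : Nat) :
    (List.range n).foldl
      (fun neighbors _ =>
        ([-1, 0, 1] : List Int).foldl (fun temp_neighbors diff =>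
          temp_neighbors ++ neighbors.map (fun x => x ++ [diff])) [])
      [[]]
    = (List.range (3 ^ n)).map (pvDig n) := by
  induction n with
  | zero => simp [pvDig]
  | succ n ih =>
    rw [List.range_succ, List.foldl_append, ih]
    have hb : ∀ d : Int, (((List.range (3 ^ n)).map (pvDig n)).map (fun x => x ++ [d]))
        = (List.range (3 ^ n)).map (fun r => pvDig n r ++ [d]) := by
      intro d; rw [List.map_map]; rfl
    simp only [List.foldl_cons, List.foldl_nil, List.nil_append, hb]
    have hM : 3 ^ (n + 1) = 3 ^ n + (3 ^ n + 3 ^ n) := by rw [pow_succ]; omega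
    rw [hM, List.range_add, List.range_add]
    simp only [List.map_append, List.map_map, List.append_assoc]
    refine congrArg₂ (· ++ ·) ?_ (congrArg₂ (· ++ ·) ?_ ?_)
    · apply List.map_congr_left
      intro r hr
      rw [List.mem_range] at hr
      have hb0 := pvDig_block n 0 r (by norm_num) hr
      simpa using hb0.symm
    · apply List.map_congr_left
      intro r hr
      rw [List.mem_range] at hr
      have hb1 := pvDig_block n 1 r (by norm_num) hr
      simp only [Function.comp_apply]
      rw [show 3 ^ n + r = 1 * 3 ^ n + r by omega, hb1]
      norm_num
    · apply List.map_congr_left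
      intro r hr
      rw [List.mem_range] at hr
      have hb2 := pvDig_block n 2 r (by norm_num) hr
      simp only [Function.comp_apply]
      rw [show 3 ^ n + (3 ^ n + r) = 2 * 3 ^ n + r by omega, hb2]
      norm_num

/-- B's running-product loop computes 3^n. -/
lemma pvTotal (n : Nat) : (List.range n).foldl (fun t _ => t * 3) 1 = 3 ^ n := by
  induction n with
  | zero => simp
  | succ n ih => rw [List.range_succ, List.foldl_append, ih]; simp [pow_succ]

/-- B's divmod loop produces the digit list. -/
lemma pvDigits (n : Nat) (k : Nat) :
    (List.range n).foldl
      (fun (s : List Int × Nat) _ => (s.1 ++ [((s.2 % 3 : Nat) : Int) - 1], s.2 / 3)) ([], k)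
    = (pvDig n k, k / 3 ^ n) := by
  induction n with
  | zero => simp [pvDig]
  | succ n ih =>
    rw [List.range_succ, List.foldl_append, ih]
    unfold pvDig
    rw [List.range_succ, List.map_append]
    simp only [List.foldl_cons, List.foldl_nil, Prod.mk.injEq]
    refine ⟨by simp, ?_⟩
    rw [Nat.div_div_eq_div_mul, ← pow_succ]

/-- filterMap over elements all distinct from m is just map. -/
lemma pvFilterMap_map {α : Type} (g : Nat → α) (m : Nat) :
    ∀ (t : List Nat), (∀ k ∈ t, k ≠ m) →
      t.filterMap (fun k => if k = m then none else some (g k)) = t.map g := by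
  intro t
  induction t with
  | nil => intro _; simp
  | cons a t ih =>
    intro h
    have ha : a ≠ m := h a (by simp)
    simp only [List.filterMap_cons, List.map_cons, if_neg ha]
    rw [ih (fun k hk => h k (by simp [hk]))]

/-- removing the unique occurrence of z equals filtering out index m. -/
lemma pvRemove_filterMap {α : Type} [BEq α] [LawfulBEq α] (g : Nat → α) (z : α) :
    ∀ (ks : List Nat) (m : Nat), m ∈ ks → ks.Nodup → (∀ k ∈ ks, (g k = z ↔ k = m)) →
      PySem.List.remove? (ks.map g) z
        = some (ks.filterMap (fun k => if k = m then none else some (g k))) := by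
  intro ks
  induction ks with
  | nil => intro m hm; simp at hm
  | cons a t ih =>
    intro m hm hnd hiff
    by_cases ha : a = m
    · have hz : g a = z := (hiff a (by simp)).mpr ha
      simp only [List.map_cons, hz, List.filterMap_cons, if_pos ha,
        PySem.List.remove?_cons_self]
      subst ha
      rw [pvFilterMap_map g a t (fun k hk => by
        intro he; subst he; exact (List.nodup_cons.mp hnd).1 hk)]
    · have hz : g a ≠ z := fun he => ha ((hiff a (by simp)).mp he)
      have hmt : m ∈ t := by cases hm with
        | head => exact absurd rfl ha
        | tail _ h => exact h
      simp only [List.map_cons, List.filterMap_cons, if_neg ha]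
      rw [PySem.List.remove?_cons_of_ne _ hz,
        ih m hmt (List.nodup_cons.mp hnd).2 (fun k hk => hiff k (by simp [hk]))]
      simp

/-- B's main loop, as a filterMap. -/
lemma pvLoopB {α : Type} (g : Nat → α) (m : Nat) :
    ∀ (l : List Nat) (acc : List α),
      l.foldl (fun result k => if k = m then result else result ++ [g k]) acc
        = acc ++ l.filterMap (fun k => if k = m then none else some (g k)) := by
  intro l
  induction l with
  | nil => intro acc; simp
  | cons a t ih =>
    intro acc
    simp only [List.foldl, List.filterMap_cons]
    by_cases ha : a = m
    · rw [if_pos ha, if_pos ha, ih]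
    · rw [if_neg ha, if_neg ha, ih, List.append_assoc]
      simp

-- ===== VERDICT (by name: the statement is the Claim_ definition above) =====
theorem neighbor_diffs_spec : Claim_equal_neighbor_diffs := by
  intro dim _
  unfold Spec_neighbor_diffs neighbor_diffs neighbor_diffs_alt
  set n := dim.toNat with hn
  simp only [pvTotal, pvLoopA, pvDigits]
  rw [pvRemove_filterMap (pvDig n) ((List.range n).map (fun _ => (0 : Int)))
      (List.range (3 ^ n)) (pvMid n)
      (List.mem_range.mpr (pvMid_lt n)) (List.nodup_range)
      (fun k hk => pvDig_eq_zeros_iff n k (List.mem_range.mp hk))]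
  have hmid : (3 ^ n - 1) / 2 = pvMid n := rfl
  rw [hmid, pvLoopB (pvDig n) (pvMid n) (List.range (3 ^ n)) []]
  simp only [Option.getD_some, List.nil_append]
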